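-- pv_equiv track=rewrite | github.com/jgfranco/formation | 2023_12/edgeListBFS.py | sumNodes
-- ===== SOURCE A (Python) =====
-- def getAdjecencyList(vertexList, edgeList):
--   adjList = {}
--
--   for vertex in vertexList:
--     adjList[vertex] = []
--   for node1, node2 in edgeList:
--     adjList[node1].append(node2)
--     adjList[node2].append(node1)
--
--   return adjList
--
-- def sumNodes(vertexList, edgeList, startNode):
--   if startNode not in vertexList: return 0
--
--   result = 0
--   adjList = getAdjecencyList(vertexList, edgeList)
--
--   from collections import deque
--   q = deque([startNode])
--   visited = set()
--   visited.add(startNode)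
--
--   while q:
--
--     curr = q.popleft()
--     result  += curr
--     for neighbour in adjList[curr]:
--       if neighbour not in visited:
--         visited.add(neighbour)
--         q.append(neighbour)
--
--
--   return result
-- ===== SOURCE B (Python) =====
-- def sumNodes(vertexList, edgeList, startNode):
--   if startNode not in vertexList:
--     return 0
--   # grow the connected component of startNode by repeated edge relaxation
--   reach = [startNode]
--   for _ in range(len(vertexList)):
--     new = list(reach)
--     for a, b in edgeList:
--       if a in new and b not in new:
--         new.append(b)
--       elif b in new and a not in new:
--         new.append(a)
--     if new == reach:
--       break
--     reach = new
--   total = 0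
--   seen = []
--   for v in vertexList:
--     if v in reach and v not in seen:
--       seen.append(v)
--       total += v
--   return total
-- ===== Notes on version B (the rewrite author's own statement) =====
-- stated objective: alternative
-- what changed: Replaces A's adjacency-list + deque BFS with a queue-free fixed-point computation: the component of startNode is grown by repeated whole-edge-list relaxation passes until no pass adds a vertex, then the distinct vertices of vertexList lying in that component are summed in one scan.
import Mathlib
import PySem

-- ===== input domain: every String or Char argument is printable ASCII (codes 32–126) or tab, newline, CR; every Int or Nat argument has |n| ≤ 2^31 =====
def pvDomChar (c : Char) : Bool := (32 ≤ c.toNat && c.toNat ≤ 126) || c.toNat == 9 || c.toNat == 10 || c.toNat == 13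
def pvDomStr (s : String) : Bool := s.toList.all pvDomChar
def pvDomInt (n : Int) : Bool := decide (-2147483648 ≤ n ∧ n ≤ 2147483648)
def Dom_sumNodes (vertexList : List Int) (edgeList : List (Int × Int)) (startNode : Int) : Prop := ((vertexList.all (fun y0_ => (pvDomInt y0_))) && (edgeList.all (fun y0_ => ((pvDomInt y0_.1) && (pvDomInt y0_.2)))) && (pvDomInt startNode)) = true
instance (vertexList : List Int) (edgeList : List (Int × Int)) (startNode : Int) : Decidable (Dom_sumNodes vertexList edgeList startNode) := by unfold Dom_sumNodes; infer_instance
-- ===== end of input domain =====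

-- B replaces A's adjacency-list + deque BFS by queue-free repeated edge-relaxation passes to a
-- fixed point, then one dedup scan of vertexList (objective: alternative algorithm, not faster).

-- ===== PORT A =====
def getAdjecencyList (vertexList : List Int) (edgeList : List (Int × Int)) : PySem.Dict Int (List Int) :=
  let adjList := vertexList.foldl (fun d v => d.insert v ([] : List Int)) PySem.Dict.empty
  edgeList.foldl (fun d e => (d.modify e.1 [] (fun l => l ++ [e.2])).modify e.2 [] (fun l => l ++ [e.1])) adjList

-- the while-q loop; fuel (vertexList.length) only makes the recursion structural, it never runs
-- out on inputs satisfying Pre_ (each iteration pops one of at most |set(vertexList)| enqueues)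
def bfsLoop (adjList : PySem.Dict Int (List Int)) : Nat → List Int → PySem.Set Int → Int → Int
  | 0, _, _, result => result
  | fuel+1, q, visited, result =>
    match q with
    | [] => result
    | curr :: qrest =>
      let st := (adjList.getD curr []).foldl
        (fun (st : PySem.Set Int × List Int) n =>
          if PySem.Set.contains st.1 n then st else (PySem.Set.add st.1 n, st.2 ++ [n]))
        (visited, ([] : List Int))
      bfsLoop adjList fuel (qrest ++ st.2) st.1 (result + curr)

def sumNodes (vertexList : List Int) (edgeList : List (Int × Int)) (startNode : Int) : Int :=
  if startNode ∈ vertexList then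
    bfsLoop (getAdjecencyList vertexList edgeList) vertexList.length [startNode]
      (PySem.Set.add PySem.Set.empty startNode) 0
  else 0

-- ===== PORT B =====
def relaxPass (edgeList : List (Int × Int)) (S : List Int) : List Int :=
  edgeList.foldl (fun T e =>
    if e.1 ∈ T ∧ e.2 ∉ T then T ++ [e.2]
    else if e.2 ∈ T ∧ e.1 ∉ T then T ++ [e.1]
    else T) S

def closureLoop (edgeList : List (Int × Int)) : Nat → List Int → List Int
  | 0, S => S
  | n+1, S =>
    let S' := relaxPass edgeList S
    if S' = S then S else closureLoop edgeList n S'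

def sumNodes_alt (vertexList : List Int) (edgeList : List (Int × Int)) (startNode : Int) : Int :=
  if startNode ∈ vertexList then
    let reach := closureLoop edgeList vertexList.length [startNode]
    (vertexList.foldl (fun (st : PySem.Set Int × Int) v =>
        if v ∈ reach ∧ v ∉ st.1 then (PySem.Set.add st.1 v, st.2 + v) else st)
      (PySem.Set.empty, 0)).2
  else 0

-- ===== PRECONDITION & SPEC =====
-- Pre_ excludes exactly the inputs where A raises KeyError: startNode ∈ vertexList while some
-- edge endpoint is missing from vertexList (adjList[endpoint] fails during construction).
def Pre_sumNodes (vertexList : List Int) (edgeList : List (Int × Int)) (startNode : Int) : Prop :=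
  startNode ∈ vertexList → ∀ e ∈ edgeList, e.1 ∈ vertexList ∧ e.2 ∈ vertexList
instance (vertexList : List Int) (edgeList : List (Int × Int)) (startNode : Int) : Decidable (Pre_sumNodes vertexList edgeList startNode) := by unfold Pre_sumNodes; infer_instance

def pvWitness_sumNodes : List Int × (List (Int × Int)) × Int := ([1, 2, 3], [(1, 2)], 1)

def Spec_sumNodes (vertexList : List Int) (edgeList : List (Int × Int)) (startNode : Int) (out : Int) : Prop := out = sumNodes_alt vertexList edgeList startNode
instance (vertexList : List Int) (edgeList : List (Int × Int)) (startNode : Int) (out : Int) : Decidable (Spec_sumNodes vertexList edgeList startNode out) := by unfold Spec_sumNodes; infer_instance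

-- ===== CLAIM (what is proved, stated in full; the proofs are below) =====
def Claim_equal_sumNodes : Prop := ∀ (vertexList : List Int) (edgeList : List (Int × Int)) (startNode : Int), Dom_sumNodes vertexList edgeList startNode → Pre_sumNodes vertexList edgeList startNode → Spec_sumNodes vertexList edgeList startNode (sumNodes vertexList edgeList startNode)

-- ===== LEMMAS AND PROOFS =====

-- the (symmetric) edge relation of the input graph, and connectivity (proof-only notions)
def EdgeRel (E : List (Int × Int)) (a b : Int) : Prop := (a, b) ∈ E ∨ (b, a) ∈ E

-- ---- B-side: properties of relaxPass / closureLoop ----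

theorem relax_step_prefix (e : Int × Int) (S : List Int) :
    S <+: (if e.1 ∈ S ∧ e.2 ∉ S then S ++ [e.2]
           else if e.2 ∈ S ∧ e.1 ∉ S then S ++ [e.1] else S) := by
  split_ifs <;> simp

theorem relax_prefix (E : List (Int × Int)) (S : List Int) : S <+: relaxPass E S := by
  induction E generalizing S with
  | nil => simp [relaxPass]
  | cons e E ih =>
    simp only [relaxPass, List.foldl_cons] at *
    exact (relax_step_prefix e S).trans (ih _)

theorem nodup_append_singleton (S : List Int) (x : Int) (h : S.Nodup) (hx : x ∉ S) :
    (S ++ [x]).Nodup := by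
  rw [List.nodup_append_comm]
  exact List.nodup_cons.2 ⟨hx, h⟩

theorem relax_nodup (E : List (Int × Int)) (S : List Int) (h : S.Nodup) : (relaxPass E S).Nodup := by
  induction E generalizing S with
  | nil => simpa [relaxPass] using h
  | cons e E ih =>
    simp only [relaxPass, List.foldl_cons] at *
    apply ih
    split_ifs with h1 h2
    · exact nodup_append_singleton S e.2 h h1.2
    · exact nodup_append_singleton S e.1 h h2.2
    · exact h

theorem relax_pred (E₀ : List (Int × Int)) (P : Int → Prop)
    (hE : ∀ e ∈ E₀, P e.1 ∧ P e.2) :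
    ∀ (E : List (Int × Int)) (S : List Int), (∀ e ∈ E, e ∈ E₀) →
    (∀ x ∈ S, P x) → ∀ x ∈ relaxPass E S, P x := by
  intro E
  induction E with
  | nil => intro S _ hS; simpa [relaxPass] using hS
  | cons e E ih =>
    intro S hsub hS
    simp only [relaxPass, List.foldl_cons] at *
    refine ih _ (fun e' he' => hsub e' (List.mem_cons_of_mem _ he')) ?_
    intro x hx
    split_ifs at hx with h1 h2
    · rcases List.mem_append.1 hx with h | h
      · exact hS x h
      · simp at h; subst h; exact (hE e (hsub e List.mem_cons_self)).2
    · rcases List.mem_append.1 hx with h | h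
      · exact hS x h
      · simp at h; subst h; exact (hE e (hsub e List.mem_cons_self)).1
    · exact hS x hx

theorem relax_conn (E₀ : List (Int × Int)) (s : Int) :
    ∀ (E : List (Int × Int)) (S : List Int), (∀ e ∈ E, e ∈ E₀) →
    (∀ x ∈ S, Relation.ReflTransGen (EdgeRel E₀) s x) →
    ∀ x ∈ relaxPass E S, Relation.ReflTransGen (EdgeRel E₀) s x := by
  intro E
  induction E with
  | nil => intro S _ hS; simpa [relaxPass] using hS
  | cons e E ih =>
    intro S hsub hS
    simp only [relaxPass, List.foldl_cons] at *
    refine ih _ (fun e' he' => hsub e' (List.mem_cons_of_mem _ he')) ?_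
    intro x hx
    split_ifs at hx with h1 h2
    · rcases List.mem_append.1 hx with h | h
      · exact hS x h
      · simp at h; subst h
        exact (hS e.1 h1.1).tail (Or.inl (hsub e List.mem_cons_self))
    · rcases List.mem_append.1 hx with h | h
      · exact hS x h
      · simp at h; subst h
        exact (hS e.2 h2.1).tail (Or.inr (hsub e List.mem_cons_self))
    · exact hS x hx

theorem relax_fix_closed (E : List (Int × Int)) (S : List Int) (h : relaxPass E S = S) :
    ∀ e ∈ E, (e.1 ∈ S → e.2 ∈ S) ∧ (e.2 ∈ S → e.1 ∈ S) := by
  induction E generalizing S with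
  | nil => simp
  | cons e E ih =>
    simp only [relaxPass, List.foldl_cons] at h
    -- the first step is sandwiched between S and the final result S, hence a no-op
    have h1 := relax_step_prefix e S
    have h2 := relax_prefix E (if e.1 ∈ S ∧ e.2 ∉ S then S ++ [e.2]
           else if e.2 ∈ S ∧ e.1 ∉ S then S ++ [e.1] else S)
    simp only [relaxPass] at h2
    rw [h] at h2
    have hXS : (if e.1 ∈ S ∧ e.2 ∉ S then S ++ [e.2]
           else if e.2 ∈ S ∧ e.1 ∉ S then S ++ [e.1] else S) = S :=
      h2.eq_of_length (Nat.le_antisymm h2.length_le h1.length_le)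
    have hrest : relaxPass E S = S := by
      rw [hXS] at h; simpa only [relaxPass] using h
    intro e' he'
    rcases List.mem_cons.1 he' with rfl | he'
    · constructor
      · intro hin
        by_contra hout
        rw [if_pos ⟨hin, hout⟩] at hXS
        simpa using congrArg List.length hXS
      · intro hin
        by_cases hfst : e'.1 ∈ S
        · exact hfst
        · exfalso
          have : ¬(e'.1 ∈ S ∧ e'.2 ∉ S) := fun hc => hfst hc.1
          rw [if_neg this, if_pos ⟨hin, hfst⟩] at hXS
          simpa using congrArg List.length hXS
    · exact ih S hrest e' he'

theorem closure_pred (E : List (Int × Int)) (P : List Int → Prop)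
    (hrel : ∀ S, P S → P (relaxPass E S)) :
    ∀ (n : Nat) (S : List Int), P S → P (closureLoop E n S) := by
  intro n
  induction n with
  | zero => intro S hS; simpa [closureLoop] using hS
  | succ n ih =>
    intro S hS
    simp only [closureLoop]
    split
    · exact hS
    · exact ih _ (hrel S hS)

theorem length_le_card (S V : List Int) (h : S.Nodup) (hs : ∀ x ∈ S, x ∈ V) :
    S.length ≤ V.toFinset.card := by
  have hsub : S.toFinset ⊆ V.toFinset := by
    intro x hx
    simp only [List.mem_toFinset] at *
    exact hs x hx
  calc S.length = S.toFinset.card := (List.toFinset_card_of_nodup h).symm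
    _ ≤ V.toFinset.card := Finset.card_le_card hsub

theorem closure_fix (E : List (Int × Int)) (V : List Int)
    (hE : ∀ e ∈ E, e.1 ∈ V ∧ e.2 ∈ V) :
    ∀ (n : Nat) (S : List Int), S.Nodup → (∀ x ∈ S, x ∈ V) →
    V.toFinset.card ≤ n + S.length →
    relaxPass E (closureLoop E n S) = closureLoop E n S := by
  intro n
  induction n with
  | zero =>
    intro S hnd hSV hcard
    simp only [closureLoop]
    obtain ⟨t, ht⟩ := relax_prefix E S
    have hnd' : (relaxPass E S).Nodup := relax_nodup E S hnd
    have hSV' : ∀ x ∈ relaxPass E S, x ∈ V :=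
      relax_pred E (· ∈ V) hE E S (fun _ he => he) hSV
    have hlen : (relaxPass E S).length ≤ V.toFinset.card := length_le_card _ V hnd' hSV'
    have hS : S.length ≤ V.toFinset.card := length_le_card _ V hnd hSV
    have hlt := congrArg List.length ht
    simp only [List.length_append] at hlt
    have ht0 : t = [] := List.eq_nil_of_length_eq_zero (by omega)
    rw [← ht, ht0, List.append_nil]
  | succ n ih =>
    intro S hnd hSV hcard
    simp only [closureLoop]
    split
    case isTrue hfix => exact hfix
    case isFalse hfix =>
      apply ih (relaxPass E S) (relax_nodup E S hnd)
        (relax_pred E (· ∈ V) hE E S (fun _ he => he) hSV)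
      obtain ⟨t, ht⟩ := relax_prefix E S
      have htne : t ≠ [] := by
        intro h0; rw [h0, List.append_nil] at ht; exact hfix ht.symm
      have h1t : 1 ≤ t.length := Nat.one_le_iff_ne_zero.2 (by simpa using htne)
      have hl := congrArg List.length ht
      simp only [List.length_append] at hl
      omega

theorem closed_complete (E : List (Int × Int)) (s : Int) (W : List Int) (hsW : s ∈ W)
    (hcl : ∀ e ∈ E, (e.1 ∈ W → e.2 ∈ W) ∧ (e.2 ∈ W → e.1 ∈ W)) :
    ∀ x, Relation.ReflTransGen (EdgeRel E) s x → x ∈ W := by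
  intro x hx
  induction hx with
  | refl => exact hsW
  | tail h1 h2 ih =>
    rcases h2 with h | h
    · exact (hcl _ h).1 ih
    · exact (hcl _ h).2 ih

-- B's final dedup-scan computes a Finset sum
theorem seenFold (reach : List Int) :
    ∀ (l seen : List Int) (tot : Int),
    (l.foldl (fun (st : PySem.Set Int × Int) v =>
        if v ∈ reach ∧ v ∉ st.1 then (PySem.Set.add st.1 v, st.2 + v) else st) (seen, tot)).2
      = tot + ∑ x ∈ (l.toFinset ∩ reach.toFinset) \ seen.toFinset, x := by
  intro l
  induction l with
  | nil => intro seen tot; simp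
  | cons v l ih =>
    intro seen tot
    simp only [List.foldl_cons]
    by_cases hv : v ∈ reach ∧ v ∉ seen
    · rw [if_pos hv, PySem.Set.add_of_not_mem hv.2, ih]
      have hset : (insert v l.toFinset ∩ reach.toFinset) \ seen.toFinset
          = insert v ((l.toFinset ∩ reach.toFinset) \ (seen ++ [v]).toFinset) := by
        ext x
        by_cases hx : x = v <;> simp [hx, hv.1, hv.2]
      simp only [List.toFinset_cons]
      rw [hset, Finset.sum_insert (by simp)]
      ring
    · rw [if_neg hv, ih]
      have hset : (insert v l.toFinset ∩ reach.toFinset) \ seen.toFinset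
          = (l.toFinset ∩ reach.toFinset) \ seen.toFinset := by
        ext x
        by_cases hx : x = v
        · simp [hx]; tauto
        · simp [hx]
      simp only [List.toFinset_cons]
      rw [hset]

-- ---- A-side: the adjacency dictionary ----

theorem pairFold_eq (E : List (Int × Int)) :
    ∀ (d : PySem.Dict Int (List Int)),
    E.foldl (fun d e => (d.modify e.1 [] (fun l => l ++ [e.2])).modify e.2 [] (fun l => l ++ [e.1])) d
      = (E.flatMap (fun e => [(e.1, e.2), (e.2, e.1)])).foldl
          (fun d p => d.modify p.1 [] (fun l => l ++ [p.2])) d := by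
  induction E with
  | nil => intro d; rfl
  | cons e E ih =>
    intro d
    simp only [List.flatMap_cons, List.foldl_cons, List.foldl_append]
    exact ih _

theorem initDict_getD (V : List Int) :
    ∀ (d : PySem.Dict Int (List Int)), (∀ c, d.getD c [] = []) →
    ∀ c, (V.foldl (fun d v => d.insert v ([] : List Int)) d).getD c [] = [] := by
  induction V with
  | nil => intro d h c; exact h c
  | cons v V ih =>
    intro d h c
    simp only [List.foldl_cons]
    refine ih _ (fun c' => ?_) c
    rw [PySem.Dict.getD_insert]
    split <;> [rfl; exact h c']

theorem mem_adj (V : List Int) (E : List (Int × Int)) (c w : Int) :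
    w ∈ (getAdjecencyList V E).getD c [] ↔ EdgeRel E c w := by
  unfold getAdjecencyList
  rw [pairFold_eq, PySem.Dict.getD_foldl_modify_append]
  rw [initDict_getD V PySem.Dict.empty (fun c' => by simp [pysem]) c]
  simp only [List.nil_append, List.mem_map, List.mem_filter, List.mem_flatMap, EdgeRel,
    List.mem_cons, List.not_mem_nil, or_false, beq_iff_eq]
  constructor
  · rintro ⟨p, ⟨⟨e, he, hp | hp⟩, hc⟩, hw⟩ <;> subst hp <;> simp only at hc hw
    · left
      have he' : e = (c, w) := by cases e; simp_all
      rwa [he'] at he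
    · right
      have he' : e = (w, c) := by cases e; simp_all
      rwa [he'] at he
  · rintro (h | h)
    · exact ⟨(c, w), ⟨⟨(c, w), h, Or.inl rfl⟩, rfl⟩, rfl⟩
    · exact ⟨(c, w), ⟨⟨(w, c), h, Or.inr rfl⟩, rfl⟩, rfl⟩

-- the inner neighbour loop of one BFS step
theorem nbrFold (ns : List Int) :
    ∀ (vis acc : List Int), vis.Nodup →
    ∃ t : List Int,
      (ns.foldl (fun (st : PySem.Set Int × List Int) n =>
          if PySem.Set.contains st.1 n then st else (PySem.Set.add st.1 n, st.2 ++ [n]))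
        (vis, acc)) = (vis ++ t, acc ++ t) ∧
      (vis ++ t).Nodup ∧ (∀ x ∈ t, x ∈ ns ∧ x ∉ vis) ∧ (∀ w ∈ ns, w ∈ vis ++ t) := by
  induction ns with
  | nil =>
    intro vis acc hnd
    exact ⟨[], by simp, by simpa using hnd, by simp, by simp⟩
  | cons n ns ih =>
    intro vis acc hnd
    simp only [List.foldl_cons]
    by_cases hn : n ∈ vis
    · rw [if_pos (by simpa [PySem.Set.contains_iff] using hn)]
      obtain ⟨t, heq, hnd', ht, hcov⟩ := ih vis acc hnd
      refine ⟨t, heq, hnd', fun x hx => ⟨List.mem_cons_of_mem _ (ht x hx).1, (ht x hx).2⟩, ?_⟩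
      intro w hw
      rcases List.mem_cons.1 hw with rfl | hw
      · exact List.mem_append.2 (Or.inl hn)
      · exact hcov w hw
    · rw [if_neg (by simpa [PySem.Set.contains_iff] using hn),
        show PySem.Set.add vis n = vis ++ [n] from PySem.Set.add_of_not_mem hn]
      obtain ⟨t, heq, hnd', ht, hcov⟩ :=
        ih (vis ++ [n]) (acc ++ [n]) (nodup_append_singleton vis n hnd hn)
      refine ⟨n :: t, by simpa [List.append_assoc] using heq,
        by simpa [List.append_assoc] using hnd', ?_, ?_⟩
      · intro x hx
        rcases List.mem_cons.1 hx with rfl | hx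
        · exact ⟨List.mem_cons_self, hn⟩
        · obtain ⟨hxm, hxn⟩ := ht x hx
          exact ⟨List.mem_cons_of_mem _ hxm, fun hc => hxn (List.mem_append.2 (Or.inl hc))⟩
      · intro w hw
        rcases List.mem_cons.1 hw with rfl | hw
        · simp
        · have := hcov w hw
          simpa [List.append_assoc] using this

-- the BFS loop invariant: the result is res + sum(q) + sum of the still-unvisited component part
theorem bfs_sum (V : List Int) (E : List (Int × Int)) (s : Int) (K : List Int)
    (hKV : ∀ x ∈ K, x ∈ V)
    (hKcl : ∀ e ∈ E, (e.1 ∈ K → e.2 ∈ K) ∧ (e.2 ∈ K → e.1 ∈ K))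
    (hKconn : ∀ x ∈ K, Relation.ReflTransGen (EdgeRel E) s x) :
    ∀ (fuel : Nat) (q vis : List Int) (res : Int),
    vis.Nodup → q.Nodup → (∀ x ∈ q, x ∈ vis) → s ∈ vis → (∀ x ∈ vis, x ∈ K) →
    (∀ v ∈ vis, v ∉ q → ∀ w, EdgeRel E v w → w ∈ vis) →
    V.toFinset.card + q.length ≤ fuel + vis.length →
    bfsLoop (getAdjecencyList V E) fuel q vis res
      = res + q.sum + ∑ x ∈ K.toFinset \ vis.toFinset, x := by
  have hKsub : ∀ (vis : List Int), s ∈ vis →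
      (∀ v ∈ vis, ∀ w, EdgeRel E v w → w ∈ vis) →
      K.toFinset \ vis.toFinset = ∅ := by
    intro vis hsv hcl
    apply Finset.sdiff_eq_empty_iff_subset.2
    intro x hx
    simp only [List.mem_toFinset] at *
    exact closed_complete E s vis hsv
      (fun e he => ⟨fun h1 => hcl e.1 h1 e.2 (Or.inl he),
                    fun h2 => hcl e.2 h2 e.1 (Or.inr he)⟩) x (hKconn x hx)
  intro fuel
  induction fuel with
  | zero =>
    intro q vis res hvnd hqnd hqv hsv hvK hclosed hcard
    cases q with
    | nil =>
      rw [hKsub vis hsv (fun v hv w hw => hclosed v hv (by simp) w hw)]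
      simp [bfsLoop]
    | cons c qt =>
      exfalso
      have h1 : vis.length ≤ V.toFinset.card :=
        length_le_card vis V hvnd (fun x hx => hKV x (hvK x hx))
      simp only [List.length_cons] at hcard
      omega
  | succ fuel ih =>
    intro q vis res hvnd hqnd hqv hsv hvK hclosed hcard
    cases q with
    | nil =>
      rw [hKsub vis hsv (fun v hv w hw => hclosed v hv (by simp) w hw)]
      simp [bfsLoop]
    | cons curr qt =>
      simp only [bfsLoop]
      obtain ⟨t, heq, hnd', ht, hcov⟩ :=
        nbrFold ((getAdjecencyList V E).getD curr []) vis [] hvnd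
      rw [heq]
      simp only [List.nil_append]
      have hcurrvis : curr ∈ vis := hqv curr List.mem_cons_self
      have hcurrK : curr ∈ K := hvK curr hcurrvis
      have htnd : t.Nodup := (List.nodup_append.1 hnd').2.1
      have htvis : ∀ x ∈ t, x ∉ vis := fun x hx => (ht x hx).2
      have htK : ∀ x ∈ t, x ∈ K := by
        intro x hx
        have hrel : EdgeRel E curr x := (mem_adj V E curr x).1 (ht x hx).1
        rcases hrel with h | h
        · exact (hKcl _ h).1 hcurrK
        · exact (hKcl _ h).2 hcurrK
      have hqtnd : qt.Nodup := (List.nodup_cons.1 hqnd).2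
      rw [ih (qt ++ t) (vis ++ t) (res + curr) hnd' ?hqnd ?hqv
            (List.mem_append.2 (Or.inl hsv)) ?hvK ?hcl ?hcard]
      case hqnd =>
        have hdisj : ∀ a ∈ qt, ∀ b ∈ t, a ≠ b := by
          intro a ha b hb hab
          subst hab
          exact htvis a hb (hqv a (List.mem_cons_of_mem _ ha))
        exact List.nodup_append.2 ⟨hqtnd, htnd, hdisj⟩
      case hqv =>
        intro x hx
        rcases List.mem_append.1 hx with h | h
        · exact List.mem_append.2 (Or.inl (hqv x (List.mem_cons_of_mem _ h)))
        · exact List.mem_append.2 (Or.inr h)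
      case hvK =>
        intro x hx
        rcases List.mem_append.1 hx with h | h
        · exact hvK x h
        · exact htK x h
      case hcl =>
        intro v hv hvq w hw
        rcases List.mem_append.1 hv with hvv | hvt
        · by_cases hvc : v = curr
          · subst hvc
            exact hcov w ((mem_adj V E v w).2 hw)
          · have hvqt : v ∉ qt := fun hc => hvq (List.mem_append.2 (Or.inl hc))
            have : v ∉ curr :: qt := by
              intro hc
              rcases List.mem_cons.1 hc with h | h
              · exact hvc h
              · exact hvqt h
            exact List.mem_append.2 (Or.inl (hclosed v hvv this w hw))
        · exact absurd (List.mem_append.2 (Or.inr hvt)) hvq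
      case hcard =>
        simp only [List.length_append, List.length_cons] at *
        omega
      -- arithmetic: move curr and the freshly visited t between the three summands
      have htsum : ∑ x ∈ t.toFinset, x = t.sum := by
        rw [List.sum_toFinset _ htnd]
        simp
      have htsub : t.toFinset ⊆ K.toFinset \ vis.toFinset := by
        intro x hx
        simp only [List.mem_toFinset, Finset.mem_sdiff] at *
        exact ⟨htK x hx, htvis x hx⟩
      have hsd := Finset.sum_sdiff (f := fun x => x) htsub
      have hset : (K.toFinset \ vis.toFinset) \ t.toFinset
          = K.toFinset \ (vis ++ t).toFinset := by
        rw [List.toFinset_append, ← Finset.sup_eq_union, sdiff_sdiff]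
      rw [hset, htsum] at hsd
      simp only [List.sum_cons, List.sum_append]
      linarith [hsd]

-- ===== VERDICT (by name: the statement is the Claim_ definition above) =====
theorem sumNodes_spec : Claim_equal_sumNodes := by
  unfold Claim_equal_sumNodes
  intro V E s _ hPre
  unfold Spec_sumNodes
  by_cases hs : s ∈ V
  case neg => simp [sumNodes, sumNodes_alt, hs]
  case pos =>
  have hE : ∀ e ∈ E, e.1 ∈ V ∧ e.2 ∈ V := hPre hs
  set K := closureLoop E V.length [s] with hKdef
  have hK1 : s ∈ K :=
    closure_pred E (fun S => s ∈ S)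
      (fun S hS => (relax_prefix E S).subset hS) V.length [s] (by simp)
  have hKnd : K.Nodup :=
    closure_pred E (fun S => S.Nodup) (fun S => relax_nodup E S) V.length [s] (by simp)
  have hKV : ∀ x ∈ K, x ∈ V :=
    closure_pred E (fun S => ∀ x ∈ S, x ∈ V)
      (fun S hS => relax_pred E (· ∈ V) hE E S (fun _ he => he) hS) V.length [s]
      (by intro x hx; simp at hx; subst hx; exact hs)
  have hKconn : ∀ x ∈ K, Relation.ReflTransGen (EdgeRel E) s x :=
    closure_pred E (fun S => ∀ x ∈ S, Relation.ReflTransGen (EdgeRel E) s x)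
      (fun S hS => relax_conn E s E S (fun _ he => he) hS) V.length [s]
      (by intro x hx; simp at hx; subst hx; exact Relation.ReflTransGen.refl)
  have hcardV : V.toFinset.card ≤ V.length := List.toFinset_card_le V
  have hfix : relaxPass E K = K :=
    closure_fix E V hE V.length [s] (by simp) (by intro x hx; simp at hx; subst hx; exact hs)
      (by simp; omega)
  have hKcl := relax_fix_closed E K hfix
  have hA : sumNodes V E s = ∑ x ∈ K.toFinset, x := by
    unfold sumNodes
    rw [if_pos hs]
    have hinit : PySem.Set.add PySem.Set.empty s = [s] := rfl
    rw [hinit]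
    rw [bfs_sum V E s K hKV hKcl hKconn V.length [s] [s] 0 (by simp) (by simp)
      (by simp) (by simp)
      (by intro x hx; simp at hx; subst hx; exact hK1)
      (by intro v hv hnv; exact absurd hv hnv)
      (by simp; omega)]
    have hssub : ({s} : Finset Int) ⊆ K.toFinset := by simpa using hK1
    have hsd := Finset.sum_sdiff (f := fun x => x) hssub
    simp only [Finset.sum_singleton] at hsd
    simp only [List.sum_cons, List.sum_nil, List.toFinset_cons, List.toFinset_nil]
    simp only [insert_empty_eq] at *
    linarith [hsd]
  have hB : sumNodes_alt V E s = ∑ x ∈ K.toFinset, x := by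
    unfold sumNodes_alt
    rw [if_pos hs]
    rw [← hKdef]
    rw [seenFold K V PySem.Set.empty 0]
    have hVK : V.toFinset ∩ K.toFinset = K.toFinset :=
      Finset.inter_eq_right.2 (by intro x hx; simp at *; exact hKV x hx)
    simp [hVK]
  rw [hA, hB]
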